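-- pv_equiv track=rewrite | github.com/ljhason/smPy | src/smPy/main.py | sgl_frame_intense_arr
-- ===== SOURCE A (Python) =====
-- def sgl_frame_intense_arr(input_array, radius, y_centre_arr, x_centre_arr):
--
--     intensity_arr_all_peaks = []
--     total_arr = []
--
--     #filling in the circle
--     for y_centre, x_centre in zip(y_centre_arr, x_centre_arr):
--         total = 0
--         for i in range(x_centre - radius, x_centre+ radius + 1):
--             for j in range(y_centre - radius, y_centre + radius + 1):
--                 if (i - x_centre) ** 2 + (j - y_centre) ** 2 < radius ** 2:
--                     intensity_arr_all_peaks.append(input_array[j][i][2])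
--                     total += int(input_array[j][i][2])
--         total_arr.append(total)
--
--     return intensity_arr_all_peaks, total_arr
-- ===== SOURCE B (Python) =====
-- def _half_width(m):
--     # smallest w >= 0 whose successor's square reaches m, i.e. largest w with w*w < m
--     w = 0
--     while (w + 1) * (w + 1) < m:
--         w += 1
--     return w
--
--
-- def sgl_frame_intense_arr(input_array, radius, y_centre_arr, x_centre_arr):
--     # Scanline over the disk's columns: each column's vertical extent is computed
--     # arithmetically (integer square root), so only in-disk cells are ever visited
--     # and no per-cell circle-membership test is performed.
--     rr = radius * radius
--     intensity_arr_all_peaks = []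
--     total_arr = []
--     for y_centre, x_centre in zip(y_centre_arr, x_centre_arr):
--         total = 0
--         for dx in range(1 - radius, radius):
--             w = _half_width(rr - dx * dx)
--             for j in range(y_centre - w, y_centre + w + 1):
--                 v = input_array[j][x_centre + dx][2]
--                 intensity_arr_all_peaks.append(v)
--                 total += int(v)
--         total_arr.append(total)
--     return intensity_arr_all_peaks, total_arr
-- ===== Notes on version B (the rewrite author's own statement) =====
-- stated objective: faster
-- what changed: Replaces A's per-cell circle-membership test over each centre's full bounding square by a column scanline: for each disk column the vertical half-width is computed arithmetically with a hand-rolled integer square root, so only in-disk cells are visited.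
import Mathlib
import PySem

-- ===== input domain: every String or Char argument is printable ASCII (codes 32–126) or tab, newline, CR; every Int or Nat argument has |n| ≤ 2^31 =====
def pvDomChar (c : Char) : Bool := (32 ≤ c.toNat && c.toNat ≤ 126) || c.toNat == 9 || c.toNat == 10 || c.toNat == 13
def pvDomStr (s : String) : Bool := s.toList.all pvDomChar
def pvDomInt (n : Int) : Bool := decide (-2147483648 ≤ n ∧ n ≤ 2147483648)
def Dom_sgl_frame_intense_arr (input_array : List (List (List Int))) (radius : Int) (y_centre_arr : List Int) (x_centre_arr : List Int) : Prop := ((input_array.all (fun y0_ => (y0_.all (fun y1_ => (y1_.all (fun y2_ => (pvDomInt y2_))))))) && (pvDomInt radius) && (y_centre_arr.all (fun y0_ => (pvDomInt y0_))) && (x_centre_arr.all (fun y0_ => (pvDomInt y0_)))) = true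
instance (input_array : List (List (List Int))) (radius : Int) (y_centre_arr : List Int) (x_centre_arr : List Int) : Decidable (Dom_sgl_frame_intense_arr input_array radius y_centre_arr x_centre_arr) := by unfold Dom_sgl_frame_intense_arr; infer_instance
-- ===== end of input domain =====

-- B replaces A's per-cell circle test over each centre's bounding square by a column
-- scanline whose vertical extent comes from a hand-rolled integer square root; the
-- equivalence proved is about the return value.

-- ===== PORT A =====
-- input_array[j][i][2] (Python semantics incl. negative-index wraparound; the default is
-- never reached inside Pre_)
def pvCell (input_array : List (List (List Int))) (j i : Int) : Int :=
  PySem.List.pyGetD (PySem.List.pyGetD (PySem.List.pyGetD input_array j []) i []) 2 0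

def sgl_frame_intense_arr (input_array : List (List (List Int))) (radius : Int) (y_centre_arr : List Int) (x_centre_arr : List Int) : List Int × List Int :=
  (y_centre_arr.zip x_centre_arr).foldl (fun acc p =>
    let res := (PySem.List.pyRange (p.2 - radius) (p.2 + radius + 1) 1).foldl (fun s i =>
        (PySem.List.pyRange (p.1 - radius) (p.1 + radius + 1) 1).foldl (fun s j =>
          if (i - p.2) ^ 2 + (j - p.1) ^ 2 < radius ^ 2 then
            (s.1 ++ [pvCell input_array j i], s.2 + pvCell input_array j i)
          else s) s) (acc.1, (0 : Int))
    (res.1, acc.2 ++ [res.2])) ([], [])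

-- ===== PORT B =====
-- _half_width's while loop, ported with fuel m.toNat (each iteration needs (w+1)^2 < m and
-- starts from w = 0, so at most m steps can ever run; the fuel is a totality guard only)
def pvHalfWidthGo (m : Int) : Nat → Int → Int
  | 0, w => w
  | Nat.succ fuel, w => if (w + 1) * (w + 1) < m then pvHalfWidthGo m fuel (w + 1) else w

def pvHalfWidth (m : Int) : Int := pvHalfWidthGo m m.toNat 0

def sgl_frame_intense_arr_alt (input_array : List (List (List Int))) (radius : Int) (y_centre_arr : List Int) (x_centre_arr : List Int) : List Int × List Int :=
  let rr := radius * radius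
  (y_centre_arr.zip x_centre_arr).foldl (fun acc p =>
    let res := (PySem.List.pyRange (1 - radius) radius 1).foldl (fun s dx =>
        let w := pvHalfWidth (rr - dx * dx)
        (PySem.List.pyRange (p.1 - w) (p.1 + w + 1) 1).foldl (fun s j =>
          (s.1 ++ [pvCell input_array j (p.2 + dx)], s.2 + pvCell input_array j (p.2 + dx))) s)
      (acc.1, (0 : Int))
    (res.1, acc.2 ++ [res.2])) ([], [])

-- ===== PRECONDITION & SPEC =====
-- Pre_ excludes exactly the inputs where Python A raises IndexError: some in-disk access
-- input_array[y+dy][x+dx][2] is out of range.  Stated arithmetically (interval endpoints and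
-- the disk half-width Nat.sqrt (r*r - dy*dy - 1) per actually-existing row/column), so it is
-- checked in time proportional to the data, never to the radius.
def Pre_sgl_frame_intense_arr (input_array : List (List (List Int))) (radius : Int) (y_centre_arr : List Int) (x_centre_arr : List Int) : Prop :=
  1 ≤ radius → ∀ p ∈ y_centre_arr.zip x_centre_arr,
    (-(input_array.length : Int) ≤ p.1 - (radius - 1) ∧ p.1 + (radius - 1) < (input_array.length : Int)) ∧
    ∀ jn ∈ List.range input_array.length,
      ∀ dy ∈ [((jn : Int) - p.1), ((jn : Int) - (input_array.length : Int) - p.1)],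
        dy * dy < radius * radius →
          (-(((input_array.getD jn []).length : Int)) ≤ p.2 - (Nat.sqrt ((radius * radius - dy * dy - 1).toNat) : Int)
            ∧ p.2 + (Nat.sqrt ((radius * radius - dy * dy - 1).toNat) : Int) < ((input_array.getD jn []).length : Int)) ∧
          ∀ c ∈ List.range (input_array.getD jn []).length,
            ∀ i ∈ [((c : Int)), ((c : Int) - ((input_array.getD jn []).length : Int))],
              p.2 - (Nat.sqrt ((radius * radius - dy * dy - 1).toNat) : Int) ≤ i →
              i ≤ p.2 + (Nat.sqrt ((radius * radius - dy * dy - 1).toNat) : Int) →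
                2 < ((input_array.getD jn []).getD c []).length
instance (input_array : List (List (List Int))) (radius : Int) (y_centre_arr : List Int) (x_centre_arr : List Int) : Decidable (Pre_sgl_frame_intense_arr input_array radius y_centre_arr x_centre_arr) := by unfold Pre_sgl_frame_intense_arr; infer_instance

def pvWitness_sgl_frame_intense_arr : List (List (List Int)) × Int × List Int × List Int :=
  ([[[0, 0, 5]]], 1, [0], [0])

def Spec_sgl_frame_intense_arr (input_array : List (List (List Int))) (radius : Int) (y_centre_arr : List Int) (x_centre_arr : List Int) (out : List Int × List Int) : Prop := out = sgl_frame_intense_arr_alt input_array radius y_centre_arr x_centre_arr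
instance (input_array : List (List (List Int))) (radius : Int) (y_centre_arr : List Int) (x_centre_arr : List Int) (out : List Int × List Int) : Decidable (Spec_sgl_frame_intense_arr input_array radius y_centre_arr x_centre_arr out) := by unfold Spec_sgl_frame_intense_arr; infer_instance

-- ===== CLAIM (what is proved, stated in full; the proofs are below) =====
def Claim_equal_sgl_frame_intense_arr : Prop := ∀ (input_array : List (List (List Int))) (radius : Int) (y_centre_arr : List Int) (x_centre_arr : List Int), Dom_sgl_frame_intense_arr input_array radius y_centre_arr x_centre_arr → Pre_sgl_frame_intense_arr input_array radius y_centre_arr x_centre_arr → Spec_sgl_frame_intense_arr input_array radius y_centre_arr x_centre_arr (sgl_frame_intense_arr input_array radius y_centre_arr x_centre_arr)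

-- ===== LEMMAS AND PROOFS =====

-- a conditional fold whose condition never holds is the identity
theorem pv_fold_if_false {σ α : Type} (f : σ → α → σ) (P : α → Prop) [DecidablePred P]
    (l : List α) (s0 : σ) (h : ∀ x ∈ l, ¬ P x) :
    l.foldl (fun s x => if P x then f s x else s) s0 = s0 := by
  induction l generalizing s0 with
  | nil => rfl
  | cons a l ih =>
      simp only [List.foldl_cons]
      rw [if_neg (h a (by simp))]
      exact ih s0 (fun x hx => h x (by simp [hx]))

-- a conditional fold over pyRange lo hi whose condition is an interval [a, b] ⊆ [lo, hi)
-- equals the unconditional fold over pyRange a (b+1)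
theorem pv_cond_fold_interval {σ : Type} (f : σ → Int → σ) (a b lo hi : Int) (s0 : σ)
    (h1 : lo ≤ a) (h2 : b + 1 ≤ hi) (h3 : a ≤ b + 1) :
    (PySem.List.pyRange lo hi 1).foldl (fun s x => if a ≤ x ∧ x ≤ b then f s x else s) s0
      = (PySem.List.pyRange a (b + 1) 1).foldl f s0 := by
  rw [PySem.List.pyRange_one_append lo a hi h1 (by omega),
      PySem.List.pyRange_one_append a (b + 1) hi h3 h2,
      List.foldl_append, List.foldl_append]
  have hleft : (PySem.List.pyRange lo a 1).foldl
      (fun s x => if a ≤ x ∧ x ≤ b then f s x else s) s0 = s0 :=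
    pv_fold_if_false _ _ _ s0 (by
      intro x hx
      rw [PySem.List.mem_pyRange_one] at hx
      omega)
  rw [hleft]
  have hmid : (PySem.List.pyRange a (b + 1) 1).foldl
      (fun s x => if a ≤ x ∧ x ≤ b then f s x else s) s0
      = (PySem.List.pyRange a (b + 1) 1).foldl f s0 :=
    by
      apply PySem.List.foldl_congr_mem
      intro acc x hx
      rw [PySem.List.mem_pyRange_one] at hx
      rw [if_pos ⟨hx.1, by omega⟩]
  rw [hmid]
  exact pv_fold_if_false _ _ _ _ (by
    intro x hx
    rw [PySem.List.mem_pyRange_one] at hx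
    omega)

-- the while loop of _half_width: with enough fuel it returns the integer "half width"
theorem pvHalfWidthGo_spec (m : Int) : ∀ (fuel : Nat) (w : Int),
    0 ≤ w → w * w < m → m - 1 - w ≤ (fuel : Int) →
    0 ≤ pvHalfWidthGo m fuel w ∧ pvHalfWidthGo m fuel w * pvHalfWidthGo m fuel w < m
      ∧ m ≤ (pvHalfWidthGo m fuel w + 1) * (pvHalfWidthGo m fuel w + 1) := by
  intro fuel
  induction fuel with
  | zero =>
      intro w hw hlt hfuel
      have hred : pvHalfWidthGo m 0 w = w := rfl
      rw [hred]
      have hm1 : m ≤ w + 1 := by push_cast at hfuel; omega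
      exact ⟨hw, hlt, by nlinarith⟩
  | succ fuel ih =>
      intro w hw hlt hfuel
      simp only [pvHalfWidthGo]
      by_cases h : (w + 1) * (w + 1) < m
      · rw [if_pos h]
        exact ih (w + 1) (by omega) h (by push_cast at hfuel ⊢; omega)
      · rw [if_neg h]
        exact ⟨hw, hlt, by omega⟩

theorem pvHalfWidth_spec (m : Int) (hm : 1 ≤ m) :
    0 ≤ pvHalfWidth m ∧ pvHalfWidth m * pvHalfWidth m < m
      ∧ m ≤ (pvHalfWidth m + 1) * (pvHalfWidth m + 1) := by
  exact pvHalfWidthGo_spec m m.toNat 0 le_rfl (by omega) (by omega)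

-- shifting a centred pyRange fold to offset coordinates
theorem pv_shift_fold {σ : Type} (r c : Int) (f : σ → Int → σ) (init : σ) :
    (PySem.List.pyRange (c - r) (c + r + 1) 1).foldl f init
      = (PySem.List.pyRange (-r) (r + 1) 1).foldl (fun s d => f s (c + d)) init := by
  rw [PySem.List.pyRange_one, PySem.List.pyRange_one]
  have hn : (c + r + 1 - (c - r)).toNat = (r + 1 - -r).toNat := by omega
  rw [hn]
  simp only [List.foldl_map]
  have : (fun (s : σ) (k : Nat) => f s (c - r + (k : Int)))
       = (fun (s : σ) (k : Nat) => f s (c + (-r + (k : Int)))) := by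
    funext s k; congr 1; ring
  rw [this]

-- one column of A (condition on j) = one column of B (explicit extent), for in-range dx
theorem pv_col (input_array : List (List (List Int))) (r x y dx : Int)
    (hr : 1 ≤ r) (hdx : 1 - r ≤ dx ∧ dx < r) (s : List Int × Int) :
    (PySem.List.pyRange (y - r) (y + r + 1) 1).foldl (fun s j =>
        if dx ^ 2 + (j - y) ^ 2 < r ^ 2 then
          (s.1 ++ [pvCell input_array j (x + dx)], s.2 + pvCell input_array j (x + dx))
        else s) s
      = (PySem.List.pyRange (y - pvHalfWidth (r * r - dx * dx))
          (y + pvHalfWidth (r * r - dx * dx) + 1) 1).foldl (fun s j =>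
          (s.1 ++ [pvCell input_array j (x + dx)], s.2 + pvCell input_array j (x + dx))) s := by
  set w := pvHalfWidth (r * r - dx * dx) with hwdef
  have hm : 1 ≤ r * r - dx * dx := by nlinarith
  obtain ⟨hw0, hwlt, hwge⟩ := pvHalfWidth_spec (r * r - dx * dx) hm
  rw [← hwdef] at hw0 hwlt hwge
  have hwr : w < r := by nlinarith
  have hcond : ∀ j : Int, (dx ^ 2 + (j - y) ^ 2 < r ^ 2) ↔ (y - w ≤ j ∧ j ≤ y + w) := by
    intro j
    constructor
    · intro h
      constructor
      · by_contra hc; push_neg at hc; nlinarith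
      · by_contra hc; push_neg at hc; nlinarith
    · intro ⟨h1, h2⟩; nlinarith
  calc (PySem.List.pyRange (y - r) (y + r + 1) 1).foldl (fun s j =>
        if dx ^ 2 + (j - y) ^ 2 < r ^ 2 then
          (s.1 ++ [pvCell input_array j (x + dx)], s.2 + pvCell input_array j (x + dx))
        else s) s
      = (PySem.List.pyRange (y - r) (y + r + 1) 1).foldl (fun s j =>
        if y - w ≤ j ∧ j ≤ y + w then
          (s.1 ++ [pvCell input_array j (x + dx)], s.2 + pvCell input_array j (x + dx))
        else s) s := by
        apply PySem.List.foldl_congr_mem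
        intro acc j _
        by_cases h : dx ^ 2 + (j - y) ^ 2 < r ^ 2
        · rw [if_pos h, if_pos ((hcond j).mp h)]
        · rw [if_neg h, if_neg (fun hh => h ((hcond j).mpr hh))]
    _ = _ := by
        have := pv_cond_fold_interval (a := y - w) (b := y + w) (lo := y - r) (hi := y + r + 1)
          (f := fun s j =>
            (s.1 ++ [pvCell input_array j (x + dx)], s.2 + pvCell input_array j (x + dx)))
          (s0 := s) (by omega) (by omega) (by omega)
        rw [← this]

-- the per-centre steps of the two ports agree
theorem pv_step_eq (input_array : List (List (List Int))) (radius : Int)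
    (acc : List Int × List Int) (p : Int × Int) :
    (let res := (PySem.List.pyRange (p.2 - radius) (p.2 + radius + 1) 1).foldl (fun s i =>
        (PySem.List.pyRange (p.1 - radius) (p.1 + radius + 1) 1).foldl (fun s j =>
          if (i - p.2) ^ 2 + (j - p.1) ^ 2 < radius ^ 2 then
            (s.1 ++ [pvCell input_array j i], s.2 + pvCell input_array j i)
          else s) s) (acc.1, (0 : Int))
     (res.1, acc.2 ++ [res.2]))
    = (let res := (PySem.List.pyRange (1 - radius) radius 1).foldl (fun s dx =>
        (PySem.List.pyRange (p.1 - pvHalfWidth (radius * radius - dx * dx))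
            (p.1 + pvHalfWidth (radius * radius - dx * dx) + 1) 1).foldl (fun s j =>
          (s.1 ++ [pvCell input_array j (p.2 + dx)], s.2 + pvCell input_array j (p.2 + dx))) s)
        (acc.1, (0 : Int))
       (res.1, acc.2 ++ [res.2])) := by
  have key : (PySem.List.pyRange (p.2 - radius) (p.2 + radius + 1) 1).foldl (fun s i =>
        (PySem.List.pyRange (p.1 - radius) (p.1 + radius + 1) 1).foldl (fun s j =>
          if (i - p.2) ^ 2 + (j - p.1) ^ 2 < radius ^ 2 then
            (s.1 ++ [pvCell input_array j i], s.2 + pvCell input_array j i)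
          else s) s) (acc.1, (0 : Int))
      = (PySem.List.pyRange (1 - radius) radius 1).foldl (fun s dx =>
        (PySem.List.pyRange (p.1 - pvHalfWidth (radius * radius - dx * dx))
            (p.1 + pvHalfWidth (radius * radius - dx * dx) + 1) 1).foldl (fun s j =>
          (s.1 ++ [pvCell input_array j (p.2 + dx)], s.2 + pvCell input_array j (p.2 + dx))) s)
        (acc.1, (0 : Int)) := by
    rw [pv_shift_fold radius p.2]
    simp only [add_sub_cancel_left]
    by_cases hr : 1 ≤ radius
    · -- split the outer range [-r, r+1) into [-r] ++ [1-r, r) ++ [r]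
      rw [PySem.List.pyRange_one_append (-radius) (1 - radius) (radius + 1) (by omega) (by omega),
          PySem.List.pyRange_one_append (1 - radius) radius (radius + 1) (by omega) (by omega),
          List.foldl_append, List.foldl_append]
      have hsing1 : PySem.List.pyRange (-radius) (1 - radius) 1 = [-radius] := by
        have : 1 - radius = -radius + 1 := by ring
        rw [this]; exact PySem.List.pyRange_one_singleton (-radius)
      have hsing2 : PySem.List.pyRange radius (radius + 1) 1 = [radius] := PySem.List.pyRange_one_singleton radius
      rw [hsing1, hsing2]
      simp only [List.foldl_cons, List.foldl_nil]
      rw [pv_fold_if_false _ (fun j => (-radius) ^ 2 + (j - p.1) ^ 2 < radius ^ 2) _ _ (by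
        intro j _ h; nlinarith [sq_nonneg (j - p.1)])]
      rw [pv_fold_if_false _ (fun j => radius ^ 2 + (j - p.1) ^ 2 < radius ^ 2) _ _ (by
        intro j _ h; nlinarith [sq_nonneg (j - p.1)])]
      apply PySem.List.foldl_congr_mem
      intro s dx hdx
      rw [PySem.List.mem_pyRange_one] at hdx
      exact pv_col input_array radius p.2 p.1 dx hr ⟨hdx.1, hdx.2⟩ s
    · -- radius ≤ 0: both outer ranges do nothing
      push_neg at hr
      rw [PySem.List.pyRange_one_eq_nil (by omega : radius ≤ 1 - radius)]
      simp only [List.foldl_nil]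
      by_cases hz : radius = 0
      · subst hz
        have hA : PySem.List.pyRange (-(0 : Int)) ((0 : Int) + 1) 1 = [(0 : Int)] := by
          rw [neg_zero]; exact PySem.List.pyRange_one_singleton 0
        rw [hA]
        simp only [List.foldl_cons, List.foldl_nil]
        exact pv_fold_if_false _ (fun j => (0 - (0:Int)) ^ 2 + (j - p.1) ^ 2 < (0:Int) ^ 2) _ _ (by
          intro j _ h; nlinarith [sq_nonneg (j - p.1)])
      · rw [PySem.List.pyRange_one_eq_nil (by omega : radius + 1 ≤ -radius)]
        simp only [List.foldl_nil]
  simp only [key]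

-- ===== VERDICT (by name: the statement is the Claim_ definition above) =====
theorem sgl_frame_intense_arr_spec : Claim_equal_sgl_frame_intense_arr := by
  intro input_array radius y_centre_arr x_centre_arr _ _
  unfold Spec_sgl_frame_intense_arr sgl_frame_intense_arr sgl_frame_intense_arr_alt
  have : (fun (acc : List Int × List Int) (p : Int × Int) =>
      (let res := (PySem.List.pyRange (p.2 - radius) (p.2 + radius + 1) 1).foldl (fun s i =>
          (PySem.List.pyRange (p.1 - radius) (p.1 + radius + 1) 1).foldl (fun s j =>
            if (i - p.2) ^ 2 + (j - p.1) ^ 2 < radius ^ 2 then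
              (s.1 ++ [pvCell input_array j i], s.2 + pvCell input_array j i)
            else s) s) (acc.1, (0 : Int))
       (res.1, acc.2 ++ [res.2])))
      = (fun (acc : List Int × List Int) (p : Int × Int) =>
      (let res := (PySem.List.pyRange (1 - radius) radius 1).foldl (fun s dx =>
          (PySem.List.pyRange (p.1 - pvHalfWidth (radius * radius - dx * dx))
              (p.1 + pvHalfWidth (radius * radius - dx * dx) + 1) 1).foldl (fun s j =>
            (s.1 ++ [pvCell input_array j (p.2 + dx)], s.2 + pvCell input_array j (p.2 + dx))) s)
          (acc.1, (0 : Int))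
       (res.1, acc.2 ++ [res.2]))) := by
    funext acc p; exact pv_step_eq input_array radius acc p
  rw [this]
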